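-- pv_equiv track=rewrite | github.com/mattias-lundell/aoc2020 | 17.py | part1
-- ===== SOURCE A (Python) =====
-- from collections import Counter
-- from itertools import chain
--
-- def part1(data):
--     grid = set()
--     for y, line in enumerate(data):
--         for x, c in enumerate(line):
--             if c == '#':
--                 grid.add((x, y, 0))
--
--     for i in range(6):
--         counts = Counter(chain.from_iterable(neighbours_3d(p) for p in grid))
--         grid = {
--             k
--             for k, v in counts.items() if v == 3 or (k in grid and v == 2)
--         }
--
--     return len(grid)
--
-- def neighbours_3d(p):
--     (x0, y0, z0) = p
--     res = []
--     for dx in [-1, 0, 1]: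
--         for dy in [-1, 0, 1]:
--             for dz in [-1, 0, 1]:
--                 if [dx, dy, dz] != [0, 0, 0]:
--                     res.append((x0 + dx, y0 + dy, z0 + dz))
--     return res
-- ===== SOURCE B (Python) =====
-- def _nbrs(c):
--     x, y, z = c
--     return [(x + dx, y + dy, z + dz)
--             for dx in (-1, 0, 1)
--             for dy in (-1, 0, 1)
--             for dz in (-1, 0, 1)
--             if (dx, dy, dz) != (0, 0, 0)]
--
-- def _step(live):
--     cand = live | {q for p in live for q in _nbrs(p)}
--     return {c for c in cand
--             if sum(q in live for q in _nbrs(c)) in ((2, 3) if c in live else (3,))}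
--
-- def _run(n, live):
--     return live if n == 0 else _run(n - 1, _step(live))
--
-- def part1(data):
--     live = {(x, y, 0)
--             for y, line in enumerate(data)
--             for x, c in enumerate(line)
--             if c == '#'}
--     return len(_run(6, live))
-- ===== Notes on version B (the rewrite author's own statement) =====
-- stated objective: alternative
-- what changed: Replaces A's scatter pass (a Counter accumulated over all neighbours of live cells, then a filter of the counter's items) with a recursive gather pass: build a candidate set of live cells plus their neighbours and keep each candidate by counting its live neighbours with membership tests.
import Mathlib
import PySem

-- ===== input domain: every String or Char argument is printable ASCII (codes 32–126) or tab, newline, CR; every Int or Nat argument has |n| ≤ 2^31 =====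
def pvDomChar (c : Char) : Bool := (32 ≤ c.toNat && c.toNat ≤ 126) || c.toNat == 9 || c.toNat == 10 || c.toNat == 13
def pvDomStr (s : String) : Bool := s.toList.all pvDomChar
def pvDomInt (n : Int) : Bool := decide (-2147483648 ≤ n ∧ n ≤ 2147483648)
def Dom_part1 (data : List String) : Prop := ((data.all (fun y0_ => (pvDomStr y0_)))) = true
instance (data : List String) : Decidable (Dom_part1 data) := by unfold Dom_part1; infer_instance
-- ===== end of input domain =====

-- B replaces A's scatter pass (Counter over all neighbours of live cells, filter its items)
-- with a recursive gather pass (candidate set = live ∪ neighbours, per-candidate membership counting).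

-- ===== PORT A =====
def neighbours3d (p : Int × Int × Int) : List (Int × Int × Int) :=
  ([-1, 0, 1] : List Int).foldl (fun res dx =>
    ([-1, 0, 1] : List Int).foldl (fun res dy =>
      ([-1, 0, 1] : List Int).foldl (fun res dz =>
        if [dx, dy, dz] ≠ ([0, 0, 0] : List Int) then
          res ++ [(p.1 + dx, p.2.1 + dy, p.2.2 + dz)]
        else res) res) res) []

def part1Grid0 (data : List String) : PySem.Set (Int × Int × Int) :=
  (PySem.List.enumerate data).foldl (fun g yl =>
    (PySem.List.enumerate yl.2.toList).foldl (fun g xc =>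
      if xc.2 == '#' then PySem.Set.add g (xc.1, yl.1, 0) else g) g) PySem.Set.empty

def part1Step (grid : PySem.Set (Int × Int × Int)) : PySem.Set (Int × Int × Int) :=
  let counts := PySem.Dict.counter (grid.flatMap neighbours3d)
  counts.items.foldl (fun s kv =>
    if kv.2 == 3 || (PySem.Set.contains grid kv.1 && kv.2 == 2) then
      PySem.Set.add s kv.1
    else s) PySem.Set.empty

def part1 (data : List String) : Int :=
  (((PySem.List.pyRange 0 6 1).foldl (fun g _ => part1Step g) (part1Grid0 data)).length : Int)

-- ===== PORT B =====
def altNbrs (c : Int × Int × Int) : List (Int × Int × Int) :=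
  ([-1, 0, 1] : List Int).flatMap (fun dx =>
    ([-1, 0, 1] : List Int).flatMap (fun dy =>
      ([-1, 0, 1] : List Int).filterMap (fun dz =>
        if (dx, dy, dz) ≠ ((0, 0, 0) : Int × Int × Int) then
          some (c.1 + dx, c.2.1 + dy, c.2.2 + dz)
        else none)))

def altStep1 (live : PySem.Set (Int × Int × Int)) : PySem.Set (Int × Int × Int) :=
  let cand := PySem.Set.union live (live.flatMap altNbrs)
  PySem.Set.ofList (cand.filter (fun c =>
    (if PySem.Set.contains live c then ([2, 3] : List Nat) else [3]).contains
      ((altNbrs c).countP (fun q => PySem.Set.contains live q))))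

def altRun : Nat → PySem.Set (Int × Int × Int) → PySem.Set (Int × Int × Int)
  | 0, live => live
  | n + 1, live => altRun n (altStep1 live)

def part1_alt (data : List String) : Int :=
  let live := PySem.Set.ofList ((PySem.List.enumerate data).flatMap (fun yl =>
    (PySem.List.enumerate yl.2.toList).filterMap (fun xc =>
      if xc.2 == '#' then some ((xc.1, yl.1, 0) : Int × Int × Int) else none)))
  ((altRun 6 live).length : Int)

-- ===== PRECONDITION & SPEC =====
def Spec_part1 (data : List String) (out : Int) : Prop := out = part1_alt data
instance (data : List String) (out : Int) : Decidable (Spec_part1 data out) := by unfold Spec_part1; infer_instance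

-- ===== CLAIM (what is proved, stated in full; the proofs are below) =====
def Claim_equal_part1 : Prop := ∀ (data : List String), Dom_part1 data → Spec_part1 data (part1 data)

-- ===== LEMMAS AND PROOFS =====

-- the 26 offsets; componentwise addition of a cell and an offset; the offset from p to x
def offs : List (Int × Int × Int) :=
  ([-1, 0, 1] : List Int).flatMap (fun dx =>
    ([-1, 0, 1] : List Int).flatMap (fun dy =>
      ([-1, 0, 1] : List Int).filterMap (fun dz =>
        if (dx, dy, dz) ≠ ((0, 0, 0) : Int × Int × Int) then some (dx, dy, dz) else none)))
def addc (p o : Int × Int × Int) : Int × Int × Int := (p.1 + o.1, p.2.1 + o.2.1, p.2.2 + o.2.2)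
def dsub (x p : Int × Int × Int) : Int × Int × Int := (x.1 - p.1, x.2.1 - p.2.1, x.2.2 - p.2.2)

lemma nodup_offs : offs.Nodup := by decide

lemma neg_mem_offs : ∀ o ∈ offs, (-o.1, -o.2.1, -o.2.2) ∈ offs := by decide

lemma nbA_map (p : Int × Int × Int) : neighbours3d p = offs.map (addc p) := by
  simp [neighbours3d, offs, addc, List.foldl]

lemma nbB_map (c : Int × Int × Int) : altNbrs c = offs.map (addc c) := by
  simp [altNbrs, offs, addc]

lemma addc_inj (p : Int × Int × Int) : Function.Injective (addc p) := by
  intro o o' h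
  simp only [addc, Prod.ext_iff] at h ⊢
  omega

lemma mem_map_addc (p x : Int × Int × Int) :
    x ∈ offs.map (addc p) ↔ dsub x p ∈ offs := by
  rw [List.mem_map]
  constructor
  · rintro ⟨o, ho, rfl⟩
    have : dsub (addc p o) p = o := by simp [dsub, addc]
    rw [this]; exact ho
  · intro h
    refine ⟨dsub x p, h, ?_⟩
    simp [dsub, addc]

lemma dsub_symm (p x : Int × Int × Int) :
    dsub x p ∈ offs ↔ dsub p x ∈ offs := by
  constructor <;> intro h <;>
  · have h2 := neg_mem_offs _ h
    simpa [dsub, Prod.ext_iff, neg_sub] using h2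

lemma count_map_addc (p x : Int × Int × Int) :
    (offs.map (addc p)).count x = if dsub x p ∈ offs then 1 else 0 := by
  rw [List.count_eq_countP, List.countP_map]
  have h1 : offs.countP ((· == x) ∘ addc p) = offs.countP (· == dsub x p) := by
    apply List.countP_congr
    intro o _
    simp only [Function.comp, beq_iff_eq, Prod.ext_iff, addc, dsub]
    omega
  rw [h1, ← List.count_eq_countP]
  by_cases h : dsub x p ∈ offs
  · simp [h, List.count_eq_one_of_mem nodup_offs h]
  · simp [h, List.count_eq_zero.mpr h]

lemma count_flat (g : List (Int × Int × Int)) (x : Int × Int × Int) :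
    (g.flatMap neighbours3d).count x = g.countP (fun p => decide (dsub x p ∈ offs)) := by
  induction g with
  | nil => simp
  | cons a t ih =>
    rw [List.flatMap_cons, List.count_append, ih, List.countP_cons, nbA_map, count_map_addc]
    by_cases h : dsub x a ∈ offs <;> simp [h] <;> omega

-- countP of "b equals a or q b" over a Nodup list, when q a is false
lemma countP_beq_or {α : Type} [BEq α] [LawfulBEq α] (a : α) (q : α → Bool) (hqa : q a = false) :
    ∀ (m : List α), m.Nodup →
      m.countP (fun b => b == a || q b) = (if a ∈ m then 1 else 0) + m.countP q := by
  intro m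
  induction m with
  | nil => simp
  | cons b r ih =>
    intro hnd
    have hr := hnd.of_cons
    have hbr : b ∉ r := (List.nodup_cons.mp hnd).1
    by_cases hba : b = a
    · subst hba
      have : r.countP (fun x => x == b || q x) = r.countP q := by
        apply List.countP_congr
        intro x hx
        have : x ≠ b := fun he => hbr (he ▸ hx)
        simp [this]
      rw [List.countP_cons, List.countP_cons, this]
      simp [hqa]
      omega
    · have hne : ((b == a) || q b) = q b := by simp [hba]
      have hm : (a ∈ b :: r) ↔ (a ∈ r) := by
        simp [List.mem_cons]
        intro he; exact absurd he.symm hba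
      rw [List.countP_cons, List.countP_cons, ih hr, hne]
      by_cases h2 : a ∈ r <;> simp [h2, hm] <;> omega

-- swap the counting direction between two Nodup lists
lemma countP_mem_swap {α : Type} [BEq α] [LawfulBEq α] :
    ∀ (g m : List α), g.Nodup → m.Nodup →
      g.countP (fun p => decide (p ∈ m)) = m.countP (fun q => decide (q ∈ g)) := by
  intro g
  induction g with
  | nil => intro m _ _; simp
  | cons a t ih =>
    intro m hg hm
    have hat : a ∉ t := (List.nodup_cons.mp hg).1
    have h1 : m.countP (fun q => decide (q ∈ a :: t)) =
        m.countP (fun b => b == a || decide (b ∈ t)) := by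
      apply List.countP_congr; intro x _; simp [List.mem_cons]
    rw [List.countP_cons, h1, countP_beq_or a (fun b => decide (b ∈ t)) (by simp [hat]) m hm,
        ← ih m hg.of_cons hm]
    by_cases h2 : a ∈ m <;> simp [h2] <;> omega

-- membership and Nodup through a conditional Set.add fold (A's set-builder loops)
lemma mem_foldAddIf {α β : Type} [BEq β] [LawfulBEq β] (c : α → Bool) (f : α → β) :
    ∀ (l : List α) (s : PySem.Set β) (x : β),
      x ∈ l.foldl (fun s a => if c a then PySem.Set.add s (f a) else s) s ↔
        x ∈ s ∨ ∃ a ∈ l, c a = true ∧ f a = x := by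
  intro l
  induction l with
  | nil => simp
  | cons a t ih =>
    intro s x
    rw [List.foldl_cons]
    by_cases h : c a = true
    · rw [if_pos h, ih]
      simp only [PySem.Set.mem_add, List.mem_cons]
      constructor
      · rintro (((hs | rfl) | ⟨a', ha', hc, rfl⟩))
        · exact Or.inl hs
        · exact Or.inr ⟨a, Or.inl rfl, h, rfl⟩
        · exact Or.inr ⟨a', Or.inr ha', hc, rfl⟩
      · rintro (hs | ⟨a', (rfl | ha'), hc, rfl⟩)
        · exact Or.inl (Or.inl hs)
        · exact Or.inl (Or.inr rfl)
        · exact Or.inr ⟨a', ha', hc, rfl⟩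
    · rw [if_neg h, ih]
      simp only [List.mem_cons]
      constructor
      · rintro (hs | ⟨a', ha', hc, rfl⟩)
        · exact Or.inl hs
        · exact Or.inr ⟨a', Or.inr ha', hc, rfl⟩
      · rintro (hs | ⟨a', (rfl | ha'), hc, rfl⟩)
        · exact Or.inl hs
        · exact absurd hc h
        · exact Or.inr ⟨a', ha', hc, rfl⟩

lemma nodup_foldAddIf {α β : Type} [BEq β] [LawfulBEq β] (c : α → Bool) (f : α → β) :
    ∀ (l : List α) (s : PySem.Set β), s.Nodup →
      (l.foldl (fun s a => if c a then PySem.Set.add s (f a) else s) s).Nodup := by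
  intro l
  induction l with
  | nil => intro s hs; simpa
  | cons a t ih =>
    intro s hs
    rw [List.foldl_cons]
    by_cases h : c a = true
    · rw [if_pos h]; exact ih _ (PySem.Set.nodup_add s (f a) hs)
    · rw [if_neg h]; exact ih _ hs

-- B's live-neighbour count of x
def cntB (live : List (Int × Int × Int)) (x : Int × Int × Int) : Nat :=
  offs.countP (fun o => decide (addc x o ∈ live))

lemma contains_eq (l : List (Int × Int × Int)) (x : Int × Int × Int) :
    PySem.Set.contains l x = decide (x ∈ l) := by
  simp [PySem.Set.contains]

lemma memA (grid : List (Int × Int × Int)) (x : Int × Int × Int) :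
    x ∈ part1Step grid ↔
      ((grid.flatMap neighbours3d).count x = 3 ∨
        (x ∈ grid ∧ (grid.flatMap neighbours3d).count x = 2)) := by
  have e : part1Step grid = (PySem.Dict.counter (grid.flatMap neighbours3d)).items.foldl
      (fun s kv => if kv.2 == 3 || (PySem.Set.contains grid kv.1 && kv.2 == 2) then
        PySem.Set.add s kv.1 else s) PySem.Set.empty := rfl
  rw [e, PySem.Dict.items_counter,
      mem_foldAddIf
        (fun kv : (Int × Int × Int) × Int => kv.2 == 3 || (PySem.Set.contains grid kv.1 && kv.2 == 2))
        (fun kv => kv.1)]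
  simp only [List.mem_map, PySem.Set.mem_ofList, contains_eq, beq_iff_eq, Bool.or_eq_true,
    Bool.and_eq_true, decide_eq_true_eq]
  constructor
  · rintro (h0 | ⟨kv, ⟨k, hk, rfl⟩, hc, hx⟩)
    · exact absurd h0 (List.not_mem_nil)
    · simp only at hc hx
      subst hx
      rcases hc with h3 | ⟨hcont, h2⟩
      · exact Or.inl (by exact_mod_cast h3)
      · exact Or.inr ⟨hcont, by exact_mod_cast h2⟩
  · rintro (h3 | ⟨hmem, h2⟩)
    · refine Or.inr ⟨(x, ((grid.flatMap neighbours3d).count x : Int)), ⟨x, ?_, rfl⟩, ?_, rfl⟩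
      · exact List.count_pos_iff.mp (by omega)
      · exact Or.inl (by dsimp only; exact_mod_cast h3)
    · refine Or.inr ⟨(x, ((grid.flatMap neighbours3d).count x : Int)), ⟨x, ?_, rfl⟩, ?_, rfl⟩
      · exact List.count_pos_iff.mp (by omega)
      · exact Or.inr ⟨hmem, by dsimp only; exact_mod_cast h2⟩

lemma cntB_eq_countP_nbrs (live : List (Int × Int × Int)) (x : Int × Int × Int) :
    (altNbrs x).countP (fun q => PySem.Set.contains live q) = cntB live x := by
  rw [nbB_map, List.countP_map, cntB]
  apply List.countP_congr
  intro o _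
  simp [contains_eq]

lemma addc_neg (x o : Int × Int × Int) :
    addc (addc x o) (-o.1, -o.2.1, -o.2.2) = x := by
  simp only [addc, Prod.ext_iff]
  constructor
  · omega
  · constructor <;> omega

lemma mem_cand (live : List (Int × Int × Int)) (x : Int × Int × Int) :
    x ∈ PySem.Set.union live (live.flatMap altNbrs) ↔
      x ∈ live ∨ ∃ p ∈ live, ∃ o ∈ offs, addc p o = x := by
  rw [PySem.Set.mem_union]
  constructor
  · rintro (h | h)
    · exact Or.inl h
    · obtain ⟨p, hp, hx⟩ := List.mem_flatMap.mp h
      rw [nbB_map] at hx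
      obtain ⟨o, ho, rfl⟩ := List.mem_map.mp hx
      exact Or.inr ⟨p, hp, o, ho, rfl⟩
  · rintro (h | ⟨p, hp, o, ho, rfl⟩)
    · exact Or.inl h
    · exact Or.inr (List.mem_flatMap.mpr ⟨p, hp, by rw [nbB_map]; exact List.mem_map_of_mem ho⟩)

lemma memB (live : List (Int × Int × Int)) (x : Int × Int × Int) :
    x ∈ altStep1 live ↔ (cntB live x = 3 ∨ (x ∈ live ∧ cntB live x = 2)) := by
  unfold altStep1
  rw [PySem.Set.mem_ofList, List.mem_filter, cntB_eq_countP_nbrs, contains_eq]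
  by_cases hm : x ∈ live
  · simp only [hm, decide_true, if_true, List.contains_eq_mem, List.mem_cons,
      List.not_mem_nil, or_false, decide_eq_true_eq, true_and]
    constructor
    · rintro ⟨_, h2 | h3⟩
      · exact Or.inr h2
      · exact Or.inl h3
    · intro h
      refine ⟨by rw [mem_cand]; exact Or.inl hm, ?_⟩
      tauto
  · simp only [hm, decide_false, Bool.false_eq_true, if_false, List.contains_eq_mem,
      List.mem_cons, List.not_mem_nil, or_false, decide_eq_true_eq, false_and]
    constructor
    · exact fun h => h.2
    · intro h3
      refine ⟨?_, h3⟩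
      rw [mem_cand]
      have hpos : 0 < cntB live x := by omega
      obtain ⟨o, ho, hmemo⟩ := List.countP_pos_iff.mp hpos
      have hmem' : addc x o ∈ live := by simpa using hmemo
      exact Or.inr ⟨addc x o, hmem', (-o.1, -o.2.1, -o.2.2), neg_mem_offs o ho, addc_neg x o⟩

lemma cnt_eq (a b : List (Int × Int × Int)) (ha : a.Nodup) (_hb : b.Nodup)
    (h : ∀ y, y ∈ a ↔ y ∈ b) (x : Int × Int × Int) :
    (a.flatMap neighbours3d).count x = cntB b x := by
  rw [count_flat]
  have h1 : a.countP (fun p => decide (dsub x p ∈ offs))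
      = a.countP (fun p => decide (p ∈ offs.map (addc x))) := by
    apply List.countP_congr
    intro p _
    simp only [decide_eq_true_eq, mem_map_addc, dsub_symm]
  have h2 := countP_mem_swap a (offs.map (addc x)) ha (nodup_offs.map (addc_inj x))
  rw [h1, h2, List.countP_map]
  apply List.countP_congr
  intro o _
  simp only [Function.comp, decide_eq_true_eq]
  exact h (addc x o)

lemma nodup_stepA (grid : List (Int × Int × Int)) : (part1Step grid).Nodup := by
  have e : part1Step grid = (PySem.Dict.counter (grid.flatMap neighbours3d)).items.foldl
      (fun s kv => if kv.2 == 3 || (PySem.Set.contains grid kv.1 && kv.2 == 2) then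
        PySem.Set.add s kv.1 else s) PySem.Set.empty := rfl
  rw [e]
  exact nodup_foldAddIf
    (fun kv : (Int × Int × Int) × Int => kv.2 == 3 || (PySem.Set.contains grid kv.1 && kv.2 == 2))
    (fun kv => kv.1) _ _ List.nodup_nil

lemma step_equiv (a b : List (Int × Int × Int)) (ha : a.Nodup) (hb : b.Nodup)
    (h : ∀ y, y ∈ a ↔ y ∈ b) :
    (part1Step a).Nodup ∧ (altStep1 b).Nodup ∧ (∀ y, y ∈ part1Step a ↔ y ∈ altStep1 b) := by
  refine ⟨nodup_stepA a, PySem.Set.nodup_ofList _, fun y => ?_⟩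
  rw [memA, memB, cnt_eq a b ha hb h y, h y]

lemma nodup_fold_pres {α β : Type} (F : List β → α → List β)
    (h : ∀ s a, s.Nodup → (F s a).Nodup) :
    ∀ (l : List α) (s : List β), s.Nodup → (l.foldl F s).Nodup := by
  intro l
  induction l with
  | nil => intro s hs; simpa
  | cons a t ih => intro s hs; rw [List.foldl_cons]; exact ih _ (h s a hs)

lemma nodup_grid0 (data : List String) : (part1Grid0 data).Nodup := by
  unfold part1Grid0
  apply nodup_fold_pres
  · intro s a hs
    exact nodup_foldAddIf (fun xc : Int × Char => xc.2 == '#')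
      (fun xc => (xc.1, a.1, (0 : Int))) _ _ hs
  · exact List.nodup_nil

-- A's nested grid-building loops, characterised
lemma mem_grid0A (data : List String) (x : Int × Int × Int) :
    x ∈ part1Grid0 data ↔
      ∃ yl ∈ PySem.List.enumerate data, ∃ xc ∈ PySem.List.enumerate yl.2.toList,
        xc.2 = '#' ∧ ((xc.1, yl.1, 0) : Int × Int × Int) = x := by
  unfold part1Grid0
  generalize PySem.List.enumerate data = l
  suffices h : ∀ (s : PySem.Set (Int × Int × Int)),
      x ∈ l.foldl (fun g yl =>
        (PySem.List.enumerate yl.2.toList).foldl (fun g xc =>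
          if xc.2 == '#' then PySem.Set.add g (xc.1, yl.1, 0) else g) g) s ↔
      x ∈ s ∨ ∃ yl ∈ l, ∃ xc ∈ PySem.List.enumerate yl.2.toList,
        xc.2 = '#' ∧ ((xc.1, yl.1, 0) : Int × Int × Int) = x by
    rw [h PySem.Set.empty]
    simp [PySem.Set.empty]
  induction l with
  | nil => simp
  | cons a t ih =>
    intro s
    rw [List.foldl_cons, ih,
        mem_foldAddIf (fun xc : Int × Char => xc.2 == '#') (fun xc => ((xc.1, a.1, 0) : Int × Int × Int))]
    simp only [List.mem_cons, beq_iff_eq]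
    constructor
    · rintro (⟨hs | ⟨xc, hxc, hc, rfl⟩⟩ | ⟨yl, hyl, xc, hxc, hc, rfl⟩)
      · exact Or.inl hs
      · exact Or.inr ⟨a, Or.inl rfl, xc, hxc, hc, rfl⟩
      · exact Or.inr ⟨yl, Or.inr hyl, xc, hxc, hc, rfl⟩
    · rintro (hs | ⟨yl, (rfl | hyl), xc, hxc, hc, rfl⟩)
      · exact Or.inl (Or.inl hs)
      · exact Or.inl (Or.inr ⟨xc, hxc, hc, rfl⟩)
      · exact Or.inr ⟨yl, hyl, xc, hxc, hc, rfl⟩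

-- B's comprehension-built grid has the same members
lemma mem_grid0B (data : List String) (x : Int × Int × Int) :
    x ∈ PySem.Set.ofList ((PySem.List.enumerate data).flatMap (fun yl =>
        (PySem.List.enumerate yl.2.toList).filterMap (fun xc =>
          if xc.2 == '#' then some ((xc.1, yl.1, 0) : Int × Int × Int) else none))) ↔
      ∃ yl ∈ PySem.List.enumerate data, ∃ xc ∈ PySem.List.enumerate yl.2.toList,
        xc.2 = '#' ∧ ((xc.1, yl.1, 0) : Int × Int × Int) = x := by
  rw [PySem.Set.mem_ofList, List.mem_flatMap]
  constructor
  · rintro ⟨yl, hyl, hx⟩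
    obtain ⟨xc, hxc, hfx⟩ := List.mem_filterMap.mp hx
    by_cases hc : xc.2 == '#'
    · rw [if_pos hc] at hfx
      exact ⟨yl, hyl, xc, hxc, beq_iff_eq.mp hc, Option.some_inj.mp hfx⟩
    · rw [if_neg hc] at hfx
      simp at hfx
  · rintro ⟨yl, hyl, xc, hxc, hc, rfl⟩
    exact ⟨yl, hyl, List.mem_filterMap.mpr ⟨xc, hxc, by rw [if_pos (beq_iff_eq.mpr hc)]⟩⟩

lemma len_eq (a b : List (Int × Int × Int)) (ha : a.Nodup) (hb : b.Nodup)
    (h : ∀ y, y ∈ a ↔ y ∈ b) : a.length = b.length :=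
  ((List.perm_ext_iff_of_nodup ha hb).mpr h).length_eq

-- ===== VERDICT (by name: the statement is the Claim_ definition above) =====
theorem part1_spec : Claim_equal_part1 := by
  intro data _
  unfold Spec_part1 part1 part1_alt
  have hr : PySem.List.pyRange 0 6 1 = [0, 1, 2, 3, 4, 5] := by decide
  rw [hr]
  simp only [List.foldl_cons, List.foldl_nil, altRun]
  have h0a : (part1Grid0 data).Nodup := nodup_grid0 data
  have h0b : (PySem.Set.ofList ((PySem.List.enumerate data).flatMap (fun yl =>
      (PySem.List.enumerate yl.2.toList).filterMap (fun xc =>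
        if xc.2 == '#' then some ((xc.1, yl.1, 0) : Int × Int × Int) else none)))).Nodup :=
    PySem.Set.nodup_ofList _
  have h0 : ∀ y, y ∈ part1Grid0 data ↔
      y ∈ PySem.Set.ofList ((PySem.List.enumerate data).flatMap (fun yl =>
        (PySem.List.enumerate yl.2.toList).filterMap (fun xc =>
          if xc.2 == '#' then some ((xc.1, yl.1, 0) : Int × Int × Int) else none))) := by
    intro y
    rw [mem_grid0A, mem_grid0B]
  have e1 := step_equiv _ _ h0a h0b h0
  have e2 := step_equiv _ _ e1.1 e1.2.1 e1.2.2
  have e3 := step_equiv _ _ e2.1 e2.2.1 e2.2.2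
  have e4 := step_equiv _ _ e3.1 e3.2.1 e3.2.2
  have e5 := step_equiv _ _ e4.1 e4.2.1 e4.2.2
  have e6 := step_equiv _ _ e5.1 e5.2.1 e5.2.2
  exact_mod_cast len_eq _ _ e6.1 e6.2.1 e6.2.2
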